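-- pv_equiv track=rewrite | github.com/marianodominguez/samples | python/pygame/dragon_fast.py | generate_dragon_lsystem
-- ===== SOURCE A (Python) =====
-- def generate_dragon_lsystem(iterations: int) -> str:
--     """Generate the dragon curve L-system string.
--
--     Axiom: "FX"
--     Rules:
--       X -> X+YF+
--       Y -> -FX-Y
--
--     Only F, +, - are interpreted (X and Y are placeholders for productions).
--     """
--     axiom = "FX"
--     rules = {
--         'X': 'X+YF+',
--         'Y': '-FX-Y'
--     }
--     s = axiom
--     for _ in range(iterations):
--         s = ''.join(rules.get(ch, ch) for ch in s)
--     return s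
-- ===== SOURCE B (Python) =====
-- def generate_dragon_lsystem(iterations: int) -> str:
--     """Generate the dragon curve L-system string by per-symbol recursive expansion."""
--     rules = {
--         'X': 'X+YF+',
--         'Y': '-FX-Y'
--     }
--
--     def expand(ch: str, depth: int) -> str:
--         if depth <= 0:
--             return ch
--         return ''.join(expand(c, depth - 1) for c in rules.get(ch, ch))
--
--     return ''.join(expand(c, iterations) for c in "FX")
-- ===== Notes on version B (the rewrite author's own statement) =====
-- stated objective: alternative
-- what changed: Replaces the n-fold whole-string rewriting loop by a recursive helper that expands each symbol independently down the production tree to full depth.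
import Mathlib
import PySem

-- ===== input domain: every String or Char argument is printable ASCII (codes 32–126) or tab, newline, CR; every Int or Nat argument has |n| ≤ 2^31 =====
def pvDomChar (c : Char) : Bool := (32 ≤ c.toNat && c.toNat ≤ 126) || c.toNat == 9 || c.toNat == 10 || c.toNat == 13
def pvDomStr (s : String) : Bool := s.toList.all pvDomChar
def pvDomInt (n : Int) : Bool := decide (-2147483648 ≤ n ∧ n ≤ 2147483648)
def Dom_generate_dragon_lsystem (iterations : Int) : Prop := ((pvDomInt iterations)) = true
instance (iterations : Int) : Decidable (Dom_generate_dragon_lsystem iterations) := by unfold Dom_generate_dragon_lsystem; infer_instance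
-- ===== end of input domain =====

-- B replaces A's n-fold whole-string rewriting loop by a per-symbol recursive expansion
-- to full depth (alternative decomposition, same result).

-- ===== PORT A =====
-- the rules dict of A
def dragonRules : PySem.Dict Char String := PySem.Dict.ofList [('X', "X+YF+"), ('Y', "-FX-Y")]

def generate_dragon_lsystem (iterations : Int) : String :=
  let axiom_ := "FX"
  (PySem.List.pyRange 0 iterations 1).foldl
    (fun s _ => String.join (s.toList.map (fun ch => PySem.Dict.getD dragonRules ch (String.ofList [ch]))))
    axiom_

-- ===== PORT B =====
-- recursive helper expand(ch, depth) of Source B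
def dragonExpand (ch : Char) (depth : Int) : String :=
  if depth ≤ 0 then String.ofList [ch]
  else String.join ((PySem.Dict.getD dragonRules ch (String.ofList [ch])).toList.map
         (fun c => dragonExpand c (depth - 1)))
termination_by depth.toNat
decreasing_by omega

def generate_dragon_lsystem_alt (iterations : Int) : String :=
  String.join ("FX".toList.map (fun c => dragonExpand c iterations))

-- ===== PRECONDITION & SPEC =====
def Spec_generate_dragon_lsystem (iterations : Int) (out : String) : Prop := out = generate_dragon_lsystem_alt iterations
instance (iterations : Int) (out : String) : Decidable (Spec_generate_dragon_lsystem iterations out) := by unfold Spec_generate_dragon_lsystem; infer_instance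

-- ===== CLAIM (what is proved, stated in full; the proofs are below) =====
def Claim_equal_generate_dragon_lsystem : Prop := ∀ (iterations : Int), Dom_generate_dragon_lsystem iterations → Spec_generate_dragon_lsystem iterations (generate_dragon_lsystem iterations)

-- ===== LEMMAS AND PROOFS =====

-- one rewriting step on character lists
def dragonStep (l : List Char) : List Char :=
  l.flatMap (fun ch => (PySem.Dict.getD dragonRules ch (String.ofList [ch])).toList)

theorem toList_join_map (l : List Char) (f : Char → String) :
    (String.join (l.map f)).toList = l.flatMap (fun c => (f c).toList) := by
  have key : ∀ (ls : List String) (a : String),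
      (List.foldl (fun r s => r ++ s) a ls).toList = a.toList ++ ls.flatMap String.toList := by
    intro ls
    induction ls with
    | nil => intro a; simp
    | cons x xs ih => intro a; simp [ih, String.toList_append]
  simp [String.join, key, List.flatMap_map]

theorem foldl_const_iterate {α β : Type} (g : α → α) (l : List β) (init : α) :
    l.foldl (fun s _ => g s) init = g^[l.length] init := by
  induction l generalizing init with
  | nil => simp
  | cons b bs ih => simp [ih, Function.iterate_succ_apply]

theorem dragonExpand_zero (c : Char) (d : Int) (h : d ≤ 0) :
    dragonExpand c d = String.ofList [c] := by
  rw [dragonExpand]; simp [h]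

theorem dragonExpand_list (n : Nat) (l : List Char) :
    l.flatMap (fun c => (dragonExpand c (n : Int)).toList) = dragonStep^[n] l := by
  induction n generalizing l with
  | zero =>
    have h0 : ∀ c : Char, (dragonExpand c ((0 : Nat) : Int)).toList = [c] := by
      intro c; rw [dragonExpand_zero c _ (by norm_num)]; simp
    push_cast at h0
    simp only [Function.iterate_zero, id_eq]
    simp [h0]
  | succ n ih =>
    have hpos : ¬ ((n : Int) + 1 ≤ 0) := by omega
    have hexp : ∀ c : Char, (dragonExpand c ((n + 1 : Nat) : Int)).toList =
        (PySem.Dict.getD dragonRules c (String.ofList [c])).toList.flatMap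
          (fun c' => (dragonExpand c' (n : Int)).toList) := by
      intro c
      rw [dragonExpand]
      push_cast
      simp only [if_neg hpos, toList_join_map]
      norm_num
    calc l.flatMap (fun c => (dragonExpand c ((n + 1 : Nat) : Int)).toList)
        = l.flatMap (fun c => (PySem.Dict.getD dragonRules c (String.ofList [c])).toList.flatMap
            (fun c' => (dragonExpand c' (n : Int)).toList)) := by
          simp only [hexp]
      _ = (dragonStep l).flatMap (fun c' => (dragonExpand c' (n : Int)).toList) := by
          simp [dragonStep, List.flatMap_assoc]
      _ = dragonStep^[n] (dragonStep l) := ih _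
      _ = dragonStep^[n + 1] l := (Function.iterate_succ_apply dragonStep n l).symm

theorem toList_step_iterate (n : Nat) (s : String) :
    ((fun s => String.join (s.toList.map (fun ch => PySem.Dict.getD dragonRules ch (String.ofList [ch]))))^[n] s).toList
      = dragonStep^[n] s.toList := by
  induction n generalizing s with
  | zero => simp
  | succ n ih =>
    rw [Function.iterate_succ_apply, Function.iterate_succ_apply, ih, toList_join_map]
    rfl

theorem string_eq_of_toList {s t : String} (h : s.toList = t.toList) : s = t := by
  simpa using congrArg String.ofList h

-- ===== VERDICT (by name: the statement is the Claim_ definition above) =====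
theorem generate_dragon_lsystem_spec : Claim_equal_generate_dragon_lsystem := by
  intro it _
  unfold Spec_generate_dragon_lsystem generate_dragon_lsystem generate_dragon_lsystem_alt
  apply string_eq_of_toList
  rw [foldl_const_iterate, PySem.List.length_pyRange_one, toList_step_iterate, toList_join_map]
  by_cases h : it ≤ 0
  · have hz : (it - 0).toNat = 0 := by omega
    rw [hz]
    simp [dragonExpand_zero _ _ h, Function.iterate_zero]
  · have hc : it = ((it - 0).toNat : Int) := by omega
    rw [hc, dragonExpand_list]
    congr 1
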